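-- pv_equiv track=rewrite | github.com/andrewc3GH/competitive-programming | USACO-Bronze+Training-python/USACO-lostcow/main.py | calculate
-- ===== SOURCE A (Python) =====
-- def calculate(start, end):
--   distanceTravelled = 0
--   currentPosition = start
--   addValue = 1
--   while True:
--     if currentPosition == end:
--       break
--     elif start < end and currentPosition > end:
--       distanceTravelled -= (currentPosition - end)
--       break
--     elif start > end and currentPosition < end:
--       distanceTravelled -= abs(currentPosition - end)
--       break
--     else:
--       distanceTravelled += abs(currentPosition - (start + addValue))
--       currentPosition = start + addValue
--       addValue *= -2
--   return distanceTravelled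
-- ===== SOURCE B (Python) =====
-- def calculate(start, end):
--     # Closed form: the cow's hops land at start + 1, -2, 4, -8, ... ; it stops at
--     # the first hop in end's direction whose magnitude reaches |end - start|.
--     # Total walked distance up to that hop is 2*2**e + g - 2 for the hop 2**e.
--     if start == end:
--         return 0
--     g = abs(end - start)
--     p = (g - 1).bit_length()            # least p with 2**p >= g
--     want = 1 if start > end else 0      # hops toward end have exponent parity: even right, odd left
--     e = p if p % 2 == want else p + 1
--     return 2 * 2 ** e + g - 2
-- ===== Notes on version B (the rewrite author's own statement) =====
-- stated objective: alternative
-- what changed: Replaces A's hop-by-hop doubling zigzag simulation with a closed form: the answer is 2*2^e + |end-start| - 2, where e is the bit length of |end-start|-1 rounded up to the parity of the hop direction (even exponents go right, odd go left).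
import Mathlib
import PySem

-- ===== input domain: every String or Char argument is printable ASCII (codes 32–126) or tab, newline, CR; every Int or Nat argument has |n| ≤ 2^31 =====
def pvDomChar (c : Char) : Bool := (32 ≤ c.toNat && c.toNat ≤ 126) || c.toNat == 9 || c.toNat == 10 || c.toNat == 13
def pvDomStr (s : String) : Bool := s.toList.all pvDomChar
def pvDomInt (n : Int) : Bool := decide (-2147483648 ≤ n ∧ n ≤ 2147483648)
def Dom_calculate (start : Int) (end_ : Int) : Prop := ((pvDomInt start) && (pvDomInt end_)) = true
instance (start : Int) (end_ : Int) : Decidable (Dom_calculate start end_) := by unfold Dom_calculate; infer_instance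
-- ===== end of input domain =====

-- B replaces A's hop-by-hop doubling simulation with an O(1) closed form from the bit length of |end-start|.

-- ===== PORT A =====
-- A's 'while True' loop, transliterated with a fuel bound that only makes it total:
-- on Dom_calculate inputs the loop breaks after at most 37 iterations, far below the fuel.
def calcLoop (start end_ : Int) (dist pos add : Int) : Nat → Int
  | 0 => dist
  | fuel+1 =>
    if pos = end_ then dist
    else if start < end_ ∧ pos > end_ then dist - (pos - end_)
    else if start > end_ ∧ pos < end_ then dist - |pos - end_|
    else calcLoop start end_ (dist + |pos - (start + add)|) (start + add) (add * -2) fuel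

def calculate (start : Int) (end_ : Int) : Int :=
  calcLoop start end_ 0 start 1 100

-- ===== PORT B =====
def calculate_alt (start : Int) (end_ : Int) : Int :=
  if start = end_ then 0
  else
    let g : Int := |end_ - start|
    let p : Nat := PySem.Int.bitLength (g - 1)        -- (g-1).bit_length(): least p with 2^p ≥ g
    let want : Nat := if start > end_ then 1 else 0   -- exponent parity of hops toward end
    let e : Nat := if p % 2 = want then p else p + 1
    2 * 2 ^ e + g - 2

-- ===== PRECONDITION & SPEC =====
def Spec_calculate (start : Int) (end_ : Int) (out : Int) : Prop := out = calculate_alt start end_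
instance (start : Int) (end_ : Int) (out : Int) : Decidable (Spec_calculate start end_ out) := by unfold Spec_calculate; infer_instance

-- ===== CLAIM (what is proved, stated in full; the proofs are below) =====
def Claim_equal_calculate : Prop := ∀ (start : Int) (end_ : Int), Dom_calculate start end_ → Spec_calculate start end_ (calculate start end_)

-- ===== LEMMAS AND PROOFS =====

theorem pv_nat_le_four_pow (n : Nat) : (n : Int) ≤ 4 ^ n := by
  induction n with
  | zero => norm_num
  | succ k ih =>
    have h1 : (1:Int) ≤ 4 ^ k := one_le_pow₀ (by norm_num)
    rw [pow_succ]
    push_cast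
    linarith

theorem pv_ex4 (g : Int) : ∃ m : Nat, g ≤ (4:Int) ^ m := by
  refine ⟨g.toNat, ?_⟩
  have h := pv_nat_le_four_pow g.toNat
  have h2 : (1:Int) ≤ 4 ^ g.toNat := one_le_pow₀ (by norm_num)
  omega

theorem pv_exN (g : Int) : ∃ m : Nat, g ≤ 2 * (4:Int) ^ m := by
  obtain ⟨m, hm⟩ := pv_ex4 g
  have h2 : (0:Int) ≤ 4 ^ m := by positivity
  exact ⟨m, by linarith⟩

def pvM (g : Int) : Nat := Nat.find (pv_ex4 g)
def pvN (g : Int) : Nat := Nat.find (pv_exN g)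

theorem pvM_spec (g : Int) : g ≤ (4:Int) ^ pvM g := Nat.find_spec (pv_ex4 g)
theorem pvM_le (g : Int) (k : Nat) (h : g ≤ (4:Int) ^ k) : pvM g ≤ k := Nat.find_le h
theorem pvM_min (g : Int) {m : Nat} (h : m < pvM g) : ¬ g ≤ (4:Int) ^ m := Nat.find_min (pv_ex4 g) h
theorem pvN_spec (g : Int) : g ≤ 2 * (4:Int) ^ pvN g := Nat.find_spec (pv_exN g)
theorem pvN_le (g : Int) (k : Nat) (h : g ≤ 2 * (4:Int) ^ k) : pvN g ≤ k := Nat.find_le h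
theorem pvN_min (g : Int) {m : Nat} (h : m < pvN g) : ¬ g ≤ 2 * (4:Int) ^ m := Nat.find_min (pv_exN g) h

theorem pv_exit0 (start end_ dist pos add : Int) (fuel : Nat) (h : pos = end_) :
    calcLoop start end_ dist pos add (fuel+1) = dist := by
  simp only [calcLoop, if_pos h]

-- one loop iteration that does not break
theorem pv_step (start end_ dist pos add : Int) (fuel : Nat)
    (h1 : ¬ pos = end_) (h2 : ¬ (start < end_ ∧ pos > end_)) (h3 : ¬ (start > end_ ∧ pos < end_)) :
    calcLoop start end_ dist pos add (fuel+1)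
      = calcLoop start end_ (dist + |pos - (start + add)|) (start + add) (add * -2) fuel := by
  simp only [calcLoop, if_neg h1, if_neg h2, if_neg h3]

-- POSITIVE direction (end = start + g): state after move 2m+1 is (3·4^m-2, start+4^m, -(2·4^m))
theorem pv_exitPos (start g : Int) (hg : 1 ≤ g) (m : Nat) (hm : g ≤ (4:Int)^m) (fuel : Nat) :
    calcLoop start (start+g) (3*4^m - 2) (start + 4^m) (-(2*4^m)) (fuel+1) = 2*4^m + g - 2 := by
  have h4 : (0:Int) < 4^m := by positivity
  by_cases he : start + (4:Int)^m = start + g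
  · have hgm : (4:Int)^m = g := by linarith [he.symm.le, he.le]
    simp only [calcLoop, if_pos he]
    linarith
  · have hne : (4:Int)^m ≠ g := fun h => he (by rw [h])
    have hgt : start + (4:Int)^m > start + g := by
      have : g < (4:Int)^m := lt_of_le_of_ne hm (Ne.symm hne)
      linarith
    simp only [calcLoop, if_neg he, if_pos (⟨by linarith, hgt⟩ : start < start + g ∧ start + (4:Int)^m > start + g)]
    ring

theorem pv_doubleStepPos (start g : Int) (m : Nat) (hlt : (4:Int)^m < g) (fuel : Nat) :
    calcLoop start (start+g) (3*4^m - 2) (start + 4^m) (-(2*4^m)) (fuel+2)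
      = calcLoop start (start+g) (3*4^(m+1) - 2) (start + 4^(m+1)) (-(2*4^(m+1))) fuel := by
  have h4 : (0:Int) < 4^m := by positivity
  rw [show fuel+2 = (fuel+1)+1 from rfl]
  rw [pv_step _ _ _ _ _ _
    (by intro h; linarith [h.le, h.symm.le])
    (by rintro ⟨-, h⟩; linarith)
    (by rintro ⟨h, -⟩; linarith)]
  rw [pv_step _ _ _ _ _ _
    (by intro h; linarith [h.le, h.symm.le])
    (by rintro ⟨-, h⟩; linarith)
    (by rintro ⟨h, -⟩; linarith)]
  congr 1
  · rw [show start + (4:Int)^m - (start + -(2*4^m)) = 3*4^m from by ring,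
        abs_of_nonneg (show (0:Int) ≤ 3*4^m by positivity),
        show start + -(2*(4:Int)^m) - (start + -(2*4^m) * -2) = -(6*4^m) from by ring,
        abs_neg, abs_of_nonneg (show (0:Int) ≤ 6*4^m by positivity)]
    simp only [pow_succ]; ring
  · simp only [pow_succ]; ring
  · simp only [pow_succ]; ring

theorem pv_loopPos (start g : Int) (hg : 1 ≤ g) :
    ∀ (f : Nat), ∀ m : Nat, m ≤ pvM g → pvM g ≤ m + f →
      calcLoop start (start+g) (3*4^m - 2) (start + 4^m) (-(2*4^m)) (2*f+1) = 2*4^(pvM g) + g - 2 := by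
  intro f
  induction f with
  | zero =>
    intro m hm hM
    have hEq : m = pvM g := le_antisymm hm (by omega)
    subst hEq
    exact pv_exitPos start g hg (pvM g) (pvM_spec g) 0
  | succ f ih =>
    intro m hm hM
    by_cases hEq : m = pvM g
    · subst hEq
      rw [show 2*(f+1)+1 = (2*f+2)+1 from by omega]
      exact pv_exitPos start g hg (pvM g) (pvM_spec g) _
    · have hmlt : m < pvM g := lt_of_le_of_ne hm hEq
      have hlt : (4:Int)^m < g := by
        have := pvM_min g hmlt; omega
      rw [show 2*(f+1)+1 = (2*f+1)+2 from by omega]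
      rw [pv_doubleStepPos start g m hlt (2*f+1)]
      exact ih (m+1) hmlt (by omega)

-- NEGATIVE direction (end = start - g): state after move 2m+2 is (6·4^m-2, start-2·4^m, 4^(m+1))
theorem pv_exitNeg (start g : Int) (hg : 1 ≤ g) (m : Nat) (hm : g ≤ 2*(4:Int)^m) (fuel : Nat) :
    calcLoop start (start-g) (6*4^m - 2) (start - 2*4^m) (4^(m+1)) (fuel+1) = 4*4^m + g - 2 := by
  have h4 : (0:Int) < 4^m := by positivity
  by_cases he : start - 2*(4:Int)^m = start - g
  · have hgm : 2*(4:Int)^m = g := by linarith [he.le, he.symm.le]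
    simp only [calcLoop, if_pos he]
    linarith
  · have hne : 2*(4:Int)^m ≠ g := fun h => he (by rw [h])
    have hlt2 : g < 2*(4:Int)^m := lt_of_le_of_ne hm (Ne.symm hne)
    simp only [calcLoop, if_neg he,
      if_neg (show ¬ (start < start - g ∧ start - 2*(4:Int)^m > start - g) from by rintro ⟨h, -⟩; linarith),
      if_pos (⟨by linarith, by linarith⟩ : start > start - g ∧ start - 2*(4:Int)^m < start - g)]
    rw [show start - 2*(4:Int)^m - (start - g) = -(2*4^m - g) from by ring,
        abs_neg, abs_of_nonneg (show (0:Int) ≤ 2*4^m - g by linarith)]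
    ring

theorem pv_doubleStepNeg (start g : Int) (m : Nat) (hlt : 2*(4:Int)^m < g) (fuel : Nat) :
    calcLoop start (start-g) (6*4^m - 2) (start - 2*4^m) (4^(m+1)) (fuel+2)
      = calcLoop start (start-g) (6*4^(m+1) - 2) (start - 2*4^(m+1)) (4^(m+2)) fuel := by
  have h4 : (0:Int) < 4^m := by positivity
  rw [show fuel+2 = (fuel+1)+1 from rfl]
  rw [pv_step _ _ _ _ _ _
    (by intro h; linarith [h.le, h.symm.le])
    (by rintro ⟨h, -⟩; linarith)
    (by rintro ⟨-, h⟩; linarith)]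
  rw [pv_step _ _ _ _ _ _
    (by intro h; simp only [pow_succ] at h; linarith [h.le, h.symm.le])
    (by rintro ⟨h, -⟩; linarith)
    (by rintro ⟨-, h⟩; simp only [pow_succ] at h; linarith)]
  congr 1
  · rw [show start - 2*(4:Int)^m - (start + 4^(m+1)) = -(2*4^m + 4^(m+1)) from by ring,
        abs_neg, abs_of_nonneg (show (0:Int) ≤ 2*4^m + 4^(m+1) by positivity),
        show start + (4:Int)^(m+1) - (start + 4^(m+1) * -2) = 3*4^(m+1) from by ring,
        abs_of_nonneg (show (0:Int) ≤ 3*4^(m+1) by positivity)]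
    simp only [pow_succ]; ring
  · simp only [pow_succ]; ring
  · simp only [pow_succ]; ring

theorem pv_loopNeg (start g : Int) (hg : 1 ≤ g) :
    ∀ (f : Nat), ∀ m : Nat, m ≤ pvN g → pvN g ≤ m + f →
      calcLoop start (start-g) (6*4^m - 2) (start - 2*4^m) (4^(m+1)) (2*f+2) = 4*4^(pvN g) + g - 2 := by
  intro f
  induction f with
  | zero =>
    intro m hm hM
    have hEq : m = pvN g := le_antisymm hm (by omega)
    subst hEq
    exact pv_exitNeg start g hg (pvN g) (pvN_spec g) 1
  | succ f ih =>
    intro m hm hM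
    by_cases hEq : m = pvN g
    · subst hEq
      rw [show 2*(f+1)+2 = (2*f+3)+1 from by omega]
      exact pv_exitNeg start g hg (pvN g) (pvN_spec g) _
    · have hmlt : m < pvN g := lt_of_le_of_ne hm hEq
      have hlt : 2*(4:Int)^m < g := by
        have := pvN_min g hmlt; omega
      rw [show 2*(f+1)+2 = (2*f+2)+2 from by omega]
      rw [pv_doubleStepNeg start g m hlt (2*f+2)]
      exact ih (m+1) hmlt (by omega)

-- A's value in closed form, both directions
theorem pv_calc_pos (start g : Int) (hg : 1 ≤ g) (hb : g ≤ (4:Int)^17) :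
    calculate start (start + g) = 2*4^(pvM g) + g - 2 := by
  unfold calculate
  rw [show (100:Nat) = 99+1 from rfl]
  rw [pv_step _ _ _ _ _ _ (by intro h; omega) (by rintro ⟨-, h⟩; omega) (by rintro ⟨h, -⟩; omega)]
  have h := pv_loopPos start g hg 49 0 (Nat.zero_le _) (by have := pvM_le g 17 hb; omega)
  rw [show (99:Nat) = 2*49+1 from rfl]
  rw [show start - (start + 1) = (-1 : Int) from by ring]
  convert h using 2

theorem pv_calc_neg (start g : Int) (hg : 1 ≤ g) (hb : g ≤ 2*(4:Int)^17) :
    calculate start (start - g) = 4*4^(pvN g) + g - 2 := by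
  unfold calculate
  rw [show (100:Nat) = 99+1 from rfl]
  rw [pv_step _ _ _ _ _ _ (by intro h; omega) (by rintro ⟨h, -⟩; omega) (by rintro ⟨-, h⟩; omega)]
  rw [show (99:Nat) = 98+1 from rfl]
  rw [pv_step _ _ _ _ _ _ (by intro h; omega) (by rintro ⟨h, -⟩; omega) (by rintro ⟨-, h⟩; omega)]
  have h := pv_loopNeg start g hg 48 0 (Nat.zero_le _) (by have := pvN_le g 17 hb; omega)
  rw [show (98:Nat) = 2*48+2 from rfl]
  rw [show start - (start + 1) = (-1:Int) from by ring,
      show start + 1 - (start + 1 * -2) = (3:Int) from by ring]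
  convert h using 2

-- bit_length characterisation: p := bitLength (g-1) is the least p with g ≤ 2^p
theorem pv_bl_ge (g : Int) (hg : 1 ≤ g) : g ≤ (2:Int) ^ PySem.Int.bitLength (g-1) := by
  have h := PySem.Int.lt_two_pow_bitLength (g-1)
  have hcast : ((g-1).natAbs : Int) = g - 1 := by omega
  have h2 : ((2:Nat) ^ PySem.Int.bitLength (g-1) : Int) = (2:Int) ^ PySem.Int.bitLength (g-1) := by
    push_cast; ring
  omega

theorem pv_bl_min (g : Int) (hg : 1 ≤ g) (q : Nat) (hq : g ≤ (2:Int)^q) :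
    PySem.Int.bitLength (g-1) ≤ q := by
  by_cases hg1 : g = 1
  · subst hg1; simp [PySem.Int.bitLength_zero]
  · have hne : g - 1 ≠ 0 := by omega
    by_contra hc
    have hle : q ≤ PySem.Int.bitLength (g-1) - 1 := by omega
    have h1 : (2:Nat)^q ≤ 2^(PySem.Int.bitLength (g-1) - 1) := Nat.pow_le_pow_right (by norm_num) hle
    have h2 := PySem.Int.two_pow_bitLength_le (g-1) hne
    have hcast : ((g-1).natAbs : Int) = g - 1 := by omega
    have h3 : ((2:Nat)^q : Int) = (2:Int)^q := by push_cast; ring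
    have h4 : ((2:Nat)^q : Int) ≤ ((2:Nat)^(PySem.Int.bitLength (g-1) - 1) : Int) := by exact_mod_cast h1
    have h5 : ((2:Nat)^(PySem.Int.bitLength (g-1) - 1) : Int) ≤ ((g-1).natAbs : Int) := by exact_mod_cast h2
    omega

theorem pv_e_even (g : Int) (hg : 1 ≤ g) :
    (if PySem.Int.bitLength (g-1) % 2 = 0 then PySem.Int.bitLength (g-1) else PySem.Int.bitLength (g-1) + 1)
      = 2 * pvM g := by
  have hp1 : PySem.Int.bitLength (g-1) ≤ 2 * pvM g := by
    apply pv_bl_min g hg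
    calc g ≤ (4:Int) ^ pvM g := pvM_spec g
    _ = (2:Int) ^ (2 * pvM g) := by rw [pow_mul]; norm_num
  apply le_antisymm
  · split_ifs with hp <;> omega
  · have hpe : PySem.Int.bitLength (g-1) ≤ (if PySem.Int.bitLength (g-1) % 2 = 0 then PySem.Int.bitLength (g-1) else PySem.Int.bitLength (g-1) + 1)
        ∧ (if PySem.Int.bitLength (g-1) % 2 = 0 then PySem.Int.bitLength (g-1) else PySem.Int.bitLength (g-1) + 1) % 2 = 0 := by
      split_ifs with hp <;> omega
    obtain ⟨k, hk⟩ : ∃ k, (if PySem.Int.bitLength (g-1) % 2 = 0 then PySem.Int.bitLength (g-1) else PySem.Int.bitLength (g-1) + 1) = 2*k :=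
      ⟨(if PySem.Int.bitLength (g-1) % 2 = 0 then PySem.Int.bitLength (g-1) else PySem.Int.bitLength (g-1) + 1) / 2, by omega⟩
    have hge : g ≤ (4:Int) ^ k := by
      have := le_trans (pv_bl_ge g hg) (pow_le_pow_right₀ (by norm_num : (1:Int) ≤ 2) (le_of_le_of_eq hpe.1 hk))
      calc g ≤ (2:Int) ^ (2*k) := this
      _ = (4:Int) ^ k := by rw [pow_mul]; norm_num
    have := pvM_le g k hge
    omega

theorem pv_e_odd (g : Int) (hg : 1 ≤ g) :
    (if PySem.Int.bitLength (g-1) % 2 = 1 then PySem.Int.bitLength (g-1) else PySem.Int.bitLength (g-1) + 1)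
      = 2 * pvN g + 1 := by
  have hp1 : PySem.Int.bitLength (g-1) ≤ 2 * pvN g + 1 := by
    apply pv_bl_min g hg
    calc g ≤ 2 * (4:Int) ^ pvN g := pvN_spec g
    _ = (2:Int) ^ (2 * pvN g + 1) := by rw [pow_succ, pow_mul]; norm_num; ring
  apply le_antisymm
  · split_ifs with hp <;> omega
  · have hpe : PySem.Int.bitLength (g-1) ≤ (if PySem.Int.bitLength (g-1) % 2 = 1 then PySem.Int.bitLength (g-1) else PySem.Int.bitLength (g-1) + 1)
        ∧ (if PySem.Int.bitLength (g-1) % 2 = 1 then PySem.Int.bitLength (g-1) else PySem.Int.bitLength (g-1) + 1) % 2 = 1 := by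
      split_ifs with hp <;> omega
    obtain ⟨k, hk⟩ : ∃ k, (if PySem.Int.bitLength (g-1) % 2 = 1 then PySem.Int.bitLength (g-1) else PySem.Int.bitLength (g-1) + 1) = 2*k+1 :=
      ⟨(if PySem.Int.bitLength (g-1) % 2 = 1 then PySem.Int.bitLength (g-1) else PySem.Int.bitLength (g-1) + 1) / 2, by omega⟩
    have hge : g ≤ 2 * (4:Int) ^ k := by
      have := le_trans (pv_bl_ge g hg) (pow_le_pow_right₀ (by norm_num : (1:Int) ≤ 2) (le_of_le_of_eq hpe.1 hk))
      calc g ≤ (2:Int) ^ (2*k+1) := this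
      _ = 2 * (4:Int) ^ k := by rw [pow_succ, pow_mul]; norm_num; ring
    have := pvN_le g k hge
    omega

-- ===== VERDICT (by name: the statement is the Claim_ definition above) =====
set_option maxRecDepth 4096 in
theorem calculate_spec : Claim_equal_calculate := by
  intro start end_ hdom
  unfold Spec_calculate
  simp only [Dom_calculate, pvDomInt, Bool.and_eq_true, decide_eq_true_eq] at hdom
  rcases lt_trichotomy start end_ with hlt | heq | hgt
  · -- start < end_
    have hg : 1 ≤ end_ - start := by omega
    have hend : end_ = start + (end_ - start) := by ring
    have hb : end_ - start ≤ (4:Int)^17 := by norm_num; omega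
    rw [hend, pv_calc_pos start (end_ - start) hg hb]
    simp only [calculate_alt]
    rw [if_neg (show ¬ start = start + (end_ - start) by omega)]
    rw [show start + (end_ - start) - start = end_ - start from by ring]
    rw [abs_of_nonneg (show (0:Int) ≤ end_ - start by omega)]
    rw [if_neg (show ¬ start > start + (end_ - start) by omega)]
    rw [pv_e_even (end_ - start) hg]
    rw [pow_mul]
    norm_num
  · subst heq
    unfold calculate
    rw [show (100:Nat) = 99+1 from rfl, pv_exit0 start start 0 start 1 99 rfl]
    simp [calculate_alt]
  · -- start > end_
    have hg : 1 ≤ start - end_ := by omega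
    have hend : end_ = start - (start - end_) := by ring
    have hb : start - end_ ≤ 2*(4:Int)^17 := by norm_num; omega
    rw [hend, pv_calc_neg start (start - end_) hg hb]
    simp only [calculate_alt]
    rw [if_neg (show ¬ start = start - (start - end_) by omega)]
    rw [show start - (start - end_) - start = -(start - end_) from by ring]
    rw [abs_neg, abs_of_nonneg (show (0:Int) ≤ start - end_ by omega)]
    rw [if_pos (show start > start - (start - end_) by omega)]
    rw [pv_e_odd (start - end_) hg]
    rw [pow_succ, pow_mul]
    norm_num
    ring
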